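-- pv_equiv track=rewrite | github.com/HITOfficial/College | ASD/Dynamic Greedy/tasks_with_deadlines.py | tasks_with_deadlines
-- ===== SOURCE A (Python) =====
-- from heapq import heappop, heappush
--
-- def tasks_with_deadlines(T):
--     n = len(T)
--     array = list((t[0], t[1], idx) for idx, t in enumerate(T))
--     last_deadline = max([deadline for deadline, _ in T])
--     allready_used = [False]*n
--     buckets = [list() for _ in range(last_deadline+1)]
--     # adding all
--     for deadline, value, idx in array:
--         # pushing into heaps negative value, to use min heap structure
--         for i in range(deadline, last_deadline+1):
--             heappush(buckets[i], (-value, idx))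
--     total_profit = 0
--     used_indexes = []
--     for deadline in range(last_deadline+1):
--         while len(buckets[deadline]) > 0:
--             val, idx = heappop(buckets[deadline])
--             if allready_used[idx] is False:
--                 allready_used[idx] = True
--                 used_indexes.append(idx)
--                 total_profit -= val
--                 break
--     return total_profit, used_indexes
-- ===== SOURCE B (Python) =====
-- from heapq import heappop, heappush
--
-- def tasks_with_deadlines(T):
--     # single heap over deadline-sorted tasks, batched pops across slot gaps
--     tasks = sorted(((d, v, idx) for idx, (d, v) in enumerate(T)), key=lambda t: t[0])
--     n = len(tasks)
--     heap = []
--     total_profit = 0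
--     used_indexes = []
--     i = 0
--     while i < n:
--         d = tasks[i][0]
--         while i < n and tasks[i][0] == d:
--             _, v, idx = tasks[i]
--             heappush(heap, (-v, idx))
--             i += 1
--         slots = tasks[i][0] - d if i < n else 1
--         for _ in range(min(slots, len(heap))):
--             nv, idx = heappop(heap)
--             total_profit -= nv
--             used_indexes.append(idx)
--     return total_profit, used_indexes
-- ===== Notes on version B (the rewrite author's own statement) =====
-- stated objective: faster
-- what changed: A builds one heap copy per time slot (every task is pushed into every bucket from its deadline up to the max deadline L) and then scans slot by slot; B sorts the tasks once by deadline and sweeps a single heap, pushing each deadline group once and batch-popping min(gap, heap size) tasks across each gap between consecutive distinct deadlines.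
-- outside the precondition, e.g. on tasks_with_deadlines([(-1, 1), (-1, 2), (0, 3)]): A returns (3, [2]), B returns (5, [1, 2])
import Mathlib
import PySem

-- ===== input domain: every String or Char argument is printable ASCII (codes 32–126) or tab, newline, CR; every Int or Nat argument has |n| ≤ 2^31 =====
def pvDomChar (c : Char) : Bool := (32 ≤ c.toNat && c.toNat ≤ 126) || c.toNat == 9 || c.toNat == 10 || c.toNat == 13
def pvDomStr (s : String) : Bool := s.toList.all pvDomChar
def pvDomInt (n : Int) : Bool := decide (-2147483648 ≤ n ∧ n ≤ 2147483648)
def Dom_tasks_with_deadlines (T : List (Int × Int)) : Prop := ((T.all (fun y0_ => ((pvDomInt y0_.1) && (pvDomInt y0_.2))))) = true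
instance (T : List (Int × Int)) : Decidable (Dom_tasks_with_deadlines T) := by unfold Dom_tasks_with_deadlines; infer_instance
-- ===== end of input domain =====

-- B replaces A's per-slot bucket heaps (one heap copy per slot up to the max deadline) by a
-- single heap over deadline-sorted tasks with batched pops across slot gaps (objective: faster).

-- ===== PORT A =====
-- Python's heapq on keys that are pairwise DISTINCT pairs pops them in exactly ascending
-- lexicographic order, so the heap is modelled exactly as a list kept sorted:
-- heappush = ordered insert, heappop = take the head.  Keys here are (-value, index) with
-- all indices distinct, so this model is exact.  (Shared by both ports: both Pythons use heapq.)
def pvHpush (x : Int × Int) : List (Int × Int) → List (Int × Int)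
  | [] => [x]
  | y :: t => if x.1 < y.1 || (x.1 == y.1 && x.2 ≤ y.2) then x :: y :: t else y :: pvHpush x t

-- A's inner `while` over buckets[deadline]: pop until an unused task is found (then mark,
-- add profit, record) or the bucket is empty.  The popped-off bucket is never read again,
-- so the shrunken bucket need not be written back.  allready_used[idx]: idx is the
-- enumerate index, always 0 ≤ idx < n, so .toNat is exact.
def pvPopUntil : List (Int × Int) → List Bool × Int × List Int → List Bool × Int × List Int
  | [], st => st
  | x :: rest, (used, tot, idxs) =>
    if used.getD x.2.toNat false then pvPopUntil rest (used, tot, idxs)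
    else (used.set x.2.toNat true, tot - x.1, idxs ++ [x.2])

-- A's bucket-filling double loop.  Python indexes buckets[i] where i may be negative only
-- outside Pre_ (there CPython wraps negative indices, mirrored by the `i + len` branch).
def pvBuckets (arr : List (Int × Int × Int)) (L : Int) : List (List (Int × Int)) :=
  arr.foldl (fun bs t =>
    (PySem.List.pyRange t.1 (L + 1) 1).foldl (fun bs2 i =>
      let j := if i < 0 then i + (bs2.length : Int) else i
      if 0 ≤ j then bs2.modify j.toNat (pvHpush (-t.2.1, t.2.2)) else bs2) bs)
    (List.replicate (L + 1).toNat [])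

def tasks_with_deadlines (T : List (Int × Int)) : Int × List Int :=
  let n := T.length
  let array := (PySem.List.enumerate T).map (fun p => (p.2.1, p.2.2, p.1))
  -- max([...]) raises ValueError on empty T: those inputs are outside Pre_
  let L := (PySem.List.max? (T.map (·.1)) (fun x => x)).getD 0
  let buckets := pvBuckets array L
  let fin := (PySem.List.pyRange 0 (L + 1) 1).foldl
    (fun st s => pvPopUntil (buckets.getD s.toNat []) st)
    (List.replicate n false, 0, ([] : List Int))
  (fin.2.1, fin.2.2)

-- ===== PORT B =====
-- Source B's `for _ in range(min(slots, len(heap))): heappop(...)`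
def pvPopN : Nat → List (Int × Int) → Int → List Int → List (Int × Int) × Int × List Int
  | 0, h, tot, idxs => (h, tot, idxs)
  | _ + 1, [], tot, idxs => ([], tot, idxs)   -- unreachable: the count is ≤ len(heap)
  | k + 1, x :: h, tot, idxs => pvPopN k h (tot - x.1) (idxs ++ [x.2])

-- Source B's outer `while i < n`: collect the group of equal deadlines (inner while),
-- push it, then pop min(slots, len(heap)) tasks.
def pvBgo : List (Int × Int × Int) → List (Int × Int) → Int → List Int → Int × List Int
  | [], _, tot, idxs => (tot, idxs)
  | t :: ts, h, tot, idxs =>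
    let d := t.1
    let grp := t :: ts.takeWhile (fun u => u.1 == d)
    let rest := ts.dropWhile (fun u => u.1 == d)
    let h' := grp.foldl (fun hh u => pvHpush (-u.2.1, u.2.2) hh) h
    let slots : Int := match rest with | [] => 1 | u :: _ => u.1 - d
    let p := pvPopN (min slots (h'.length : Int)).toNat h' tot idxs
    pvBgo rest p.1 p.2.1 p.2.2
termination_by ts _ _ _ => ts.length
decreasing_by
  have := List.length_dropWhile_le (fun u => u.1 == t.1) ts
  simpa using Nat.lt_succ_of_le this

def tasks_with_deadlines_alt (T : List (Int × Int)) : Int × List Int :=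
  let tasks := PySem.List.sorted
    ((PySem.List.enumerate T).map (fun p => (p.2.1, p.2.2, p.1))) (fun t => t.1) false
  pvBgo tasks [] 0 []

-- ===== PRECONDITION & SPEC =====
-- Pre_ excludes the empty list (A's max() raises ValueError) and lists containing a negative
-- deadline — a negative slot count is outside the task's natural domain; on such lists A either
-- raises IndexError (when some deadline < -(max deadline + 1)) or relies on CPython's
-- negative-index wraparound, which silently treats the negative deadline as 0.
def Pre_tasks_with_deadlines (T : List (Int × Int)) : Prop :=
  T ≠ [] ∧ ∀ p ∈ T, 0 ≤ p.1
instance (T : List (Int × Int)) : Decidable (Pre_tasks_with_deadlines T) := by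
  unfold Pre_tasks_with_deadlines; infer_instance

def pvWitness_tasks_with_deadlines : (List (Int × Int)) := [(0, 5), (2, 3), (2, 7)]

def Spec_tasks_with_deadlines (T : List (Int × Int)) (out : Int × List Int) : Prop :=
  out = tasks_with_deadlines_alt T
instance (T : List (Int × Int)) (out : Int × List Int) : Decidable (Spec_tasks_with_deadlines T out) := by
  unfold Spec_tasks_with_deadlines; infer_instance

-- ===== CLAIM (what is proved, stated in full; the proofs are below) =====
def Claim_equal_tasks_with_deadlines : Prop := ∀ (T : List (Int × Int)), Dom_tasks_with_deadlines T → Pre_tasks_with_deadlines T → Spec_tasks_with_deadlines T (tasks_with_deadlines T)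

-- ===== LEMMAS AND PROOFS =====

-- the heap order: lexicographic ≤ on (negated value, index)
def rK (a b : Int × Int) : Prop := a.1 < b.1 ∨ (a.1 = b.1 ∧ a.2 ≤ b.2)

theorem rK_iff (x y : Int × Int) :
    (x.1 < y.1 || (x.1 == y.1 && x.2 ≤ y.2)) = true ↔ rK x y := by
  simp [rK]

theorem rK_total (x y : Int × Int) : rK x y ∨ rK y x := by
  unfold rK; omega

theorem rK_antisymm {x y : Int × Int} (h1 : rK x y) (h2 : rK y x) : x = y := by
  unfold rK at h1 h2
  have : x.1 = y.1 ∧ x.2 = y.2 := by omega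
  exact Prod.ext this.1 this.2

theorem hpush_perm (x : Int × Int) (h : List (Int × Int)) :
    (pvHpush x h).Perm (x :: h) := by
  induction h with
  | nil => simp [pvHpush]
  | cons y t ih =>
    unfold pvHpush
    split
    · exact List.Perm.refl _
    · exact (List.Perm.cons y ih).trans (List.Perm.swap x y t)

theorem hpush_sorted (x : Int × Int) (h : List (Int × Int)) (hs : h.Pairwise rK) :
    (pvHpush x h).Pairwise rK := by
  induction h with
  | nil => simp [pvHpush]
  | cons y t ih =>
    rw [List.pairwise_cons] at hs
    unfold pvHpush
    split
    · rename_i hc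
      rw [rK_iff] at hc
      refine List.pairwise_cons.2 ⟨?_, List.pairwise_cons.2 hs⟩
      intro z hz
      rcases List.mem_cons.1 hz with rfl | hz2
      · exact hc
      · rcases rK_total x z with h' | h'
        · exact h'
        · have := hs.1 z hz2
          unfold rK at *; omega
    · rename_i hc
      have hyx : rK y x := by
        rcases rK_total x y with h' | h'
        · exact absurd ((rK_iff x y).2 h') (by simpa using hc)
        · exact h'
      refine List.pairwise_cons.2 ⟨?_, ih hs.2⟩
      intro z hz
      rcases List.mem_cons.1 ((hpush_perm x t).mem_iff.1 hz) with rfl | hz2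
      · exact hyx
      · exact hs.1 z hz2

def kpushAll (ks : List (Int × Int)) (h : List (Int × Int)) : List (Int × Int) :=
  ks.foldl (fun hh k => pvHpush k hh) h

theorem kpushAll_perm (ks h : List (Int × Int)) : (kpushAll ks h).Perm (h ++ ks) := by
  induction ks generalizing h with
  | nil => simp [kpushAll]
  | cons k ks ih =>
    have h1 : (kpushAll ks (pvHpush k h)).Perm (pvHpush k h ++ ks) := ih _
    have h2 : (pvHpush k h ++ ks).Perm ((k :: h) ++ ks) := (hpush_perm k h).append_right ks
    have h3 : ((k :: h) ++ ks).Perm (h ++ k :: ks) := by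
      simpa using (List.perm_middle (a := k) (l₁ := h) (l₂ := ks)).symm
    exact (h1.trans h2).trans h3

theorem kpushAll_sorted (ks h : List (Int × Int)) (hs : h.Pairwise rK) :
    (kpushAll ks h).Pairwise rK := by
  induction ks generalizing h with
  | nil => simpa [kpushAll]
  | cons k ks ih => exact ih _ (hpush_sorted k h hs)

theorem sorted_unique {l1 l2 : List (Int × Int)} (h1 : l1.Pairwise rK) (h2 : l2.Pairwise rK)
    (hp : l1.Perm l2) : l1 = l2 :=
  List.eq_of_perm_of_sorted (fun _ _ _ _ hab hba => rK_antisymm hab hba) h1 h2 hp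

def keyOf (t : Int × Int × Int) : Int × Int := (-t.2.1, t.2.2)

def pvPool (arr : List (Int × Int × Int)) (c : Int) : List (Int × Int) :=
  kpushAll ((arr.filter (fun t => decide (t.1 < c))).map keyOf) []

def usedAt (u : List Bool) (i : Int) : Bool := u.getD i.toNat false

theorem pool_sorted (arr : List (Int × Int × Int)) (c : Int) : (pvPool arr c).Pairwise rK :=
  kpushAll_sorted _ _ (List.Pairwise.nil)

theorem pool_perm (arr : List (Int × Int × Int)) (c : Int) :
    (pvPool arr c).Perm ((arr.filter (fun t => decide (t.1 < c))).map keyOf) := by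
  simpa using kpushAll_perm ((arr.filter (fun t => decide (t.1 < c))).map keyOf) []

theorem pool_congr (arr : List (Int × Int × Int)) (c₁ c₂ : Int)
    (h : ∀ t ∈ arr, t.1 < c₁ ↔ t.1 < c₂) : pvPool arr c₁ = pvPool arr c₂ := by
  unfold pvPool
  congr 1
  congr 1
  exact List.filter_congr (fun t ht => by simpa using h t ht)

-- generic: a fold whose step preserves length preserves length
theorem foldl_length_inv {α β : Type} (l : List α) (f : List β → α → List β) (bs : List β)
    (hf : ∀ bs x, (f bs x).length = bs.length) : (l.foldl f bs).length = bs.length := by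
  induction l generalizing bs with
  | nil => rfl
  | cons x l ih => rw [List.foldl_cons, ih, hf]

theorem range_fold_get (k : Int × Int) (a b : Int) (ha : 0 ≤ a) (s : Nat)
    (bs : List (List (Int × Int))) :
    ((PySem.List.pyRange a b 1).foldl (fun bs2 i =>
      let j := if i < 0 then i + (bs2.length : Int) else i
      if 0 ≤ j then bs2.modify j.toNat (pvHpush k) else bs2) bs)[s]?
    = if a ≤ (s : Int) ∧ (s : Int) < b then bs[s]?.map (pvHpush k) else bs[s]? := by
  by_cases hab : b ≤ a
  · rw [PySem.List.pyRange_one_eq_nil hab]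
    simp only [List.foldl_nil]
    rw [if_neg]; omega
  · push_neg at hab
    have hterm : ((b - (a+1)).toNat) < (b - a).toNat := by omega
    rw [PySem.List.pyRange_one_cons hab, List.foldl_cons]
    have h1 : ¬ a < 0 := by omega
    dsimp only
    rw [if_neg h1, if_pos ha]
    rw [range_fold_get k (a+1) b (by omega) s, List.getElem?_modify]
    by_cases hsa : a.toNat = s
    · have hsEq : (s : Int) = a := by omega
      rw [if_neg (show ¬ (a + 1 ≤ (s : Int) ∧ (s : Int) < b) by omega),
          if_pos (show a ≤ (s : Int) ∧ (s : Int) < b by omega)]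
      cases bs[s]? <;> simp [hsa]
    · have hsne : (s : Int) ≠ a := by omega
      by_cases hcond : a + 1 ≤ (s : Int) ∧ (s : Int) < b
      · rw [if_pos hcond, if_pos (show a ≤ (s : Int) ∧ (s : Int) < b by omega)]
        cases bs[s]? <;> simp [hsa]
      · rw [if_neg hcond, if_neg (show ¬ (a ≤ (s : Int) ∧ (s : Int) < b) by omega)]
        cases bs[s]? <;> simp [hsa]
termination_by (b - a).toNat

theorem buckets_get (arr : List (Int × Int × Int)) (L : Int)
    (hpos : ∀ t ∈ arr, 0 ≤ t.1) (s : Nat) (hs : (s : Int) < L + 1) :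
    (pvBuckets arr L)[s]? =
      some (kpushAll ((arr.filter (fun t => decide (t.1 ≤ (s : Int)))).map keyOf) []) := by
  unfold pvBuckets
  have main : ∀ (bs : List (List (Int × Int))),
      (arr.foldl (fun bs t =>
        (PySem.List.pyRange t.1 (L + 1) 1).foldl (fun bs2 i =>
          let j := if i < 0 then i + (bs2.length : Int) else i
          if 0 ≤ j then bs2.modify j.toNat (pvHpush (-t.2.1, t.2.2)) else bs2) bs) bs)[s]?
      = bs[s]?.map (fun h => kpushAll ((arr.filter (fun t => decide (t.1 ≤ (s : Int)))).map keyOf) h) := by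
    induction arr with
    | nil => intro bs; simp [kpushAll]
    | cons t ts ih =>
      intro bs
      have hposts : ∀ u ∈ ts, 0 ≤ u.1 := fun u hu => hpos u (List.mem_cons_of_mem t hu)
      rw [List.foldl_cons, ih hposts]
      rw [range_fold_get (-t.2.1, t.2.2) t.1 (L+1) (hpos t (List.mem_cons_self ..)) s bs]
      by_cases hc : t.1 ≤ (s : Int)
      · rw [if_pos ⟨hc, hs⟩]
        rw [List.filter_cons_of_pos (by simpa using hc)]
        cases bs[s]? with
        | none => rfl
        | some h => simp [kpushAll, keyOf]
      · rw [if_neg (by omega)]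
        rw [List.filter_cons_of_neg (by simpa using hc)]
  rw [main]
  have hsn : s < (L + 1).toNat := by omega
  rw [List.getElem?_replicate, if_pos hsn]
  rfl

-- ---- the per-slot pop step of A, characterised by the unused-filter of the pool ----

theorem popUntil_eq (P : List (Int × Int)) (used : List Bool) (tot : Int) (idxs : List Int) :
    pvPopUntil P (used, tot, idxs) =
      match P.filter (fun y => !(usedAt used y.2)) with
      | [] => (used, tot, idxs)
      | x :: _ => (used.set x.2.toNat true, tot - x.1, idxs ++ [x.2]) := by
  induction P with
  | nil => rfl
  | cons y P ih =>
    have hd : pvPopUntil (y :: P) (used, tot, idxs)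
        = if usedAt used y.2 then pvPopUntil P (used, tot, idxs)
          else (used.set y.2.toNat true, tot - y.1, idxs ++ [y.2]) := rfl
    by_cases hy : usedAt used y.2
    · rw [hd, if_pos hy, ih, List.filter_cons_of_neg (by simp [hy])]
    · rw [hd, if_neg hy, List.filter_cons_of_pos (by simp [hy])]

theorem usedAt_set_same {u : List Bool} {j : Int} (hlen : j.toNat < u.length) :
    usedAt (u.set j.toNat true) j = true := by
  simp [usedAt, List.getD_eq_getElem?_getD, List.getElem?_set, hlen]

theorem usedAt_set_ne {u : List Bool} {j i : Int} (hne : i.toNat ≠ j.toNat) :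
    usedAt (u.set j.toNat true) i = usedAt u i := by
  simp [usedAt, List.getD_eq_getElem?_getD, List.getElem?_set, Ne.symm hne]

theorem length_foldl_set (l : List (Int × Int)) (u : List Bool) :
    (l.foldl (fun u y => u.set y.2.toNat true) u).length = u.length :=
  foldl_length_inv l _ u (fun u y => List.length_set ..)

theorem filter_after (P : List (Int × Int)) (used : List Bool) (x : Int × Int)
    (tl : List (Int × Int)) (hnd : (P.map (·.2)).Nodup) (hpos : ∀ y ∈ P, 0 ≤ y.2)
    (hlen : ∀ y ∈ P, y.2.toNat < used.length)
    (hf : P.filter (fun y => !(usedAt used y.2)) = x :: tl) :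
    P.filter (fun y => !(usedAt (used.set x.2.toNat true) y.2)) = tl := by
  induction P with
  | nil => simp at hf
  | cons y P ih =>
    have hnd2 : y.2 ∉ P.map (·.2) ∧ (P.map (·.2)).Nodup := by
      simpa using hnd
    have hposP : ∀ z ∈ P, 0 ≤ z.2 := fun z hz => hpos z (List.mem_cons_of_mem _ hz)
    have hlenP : ∀ z ∈ P, z.2.toNat < used.length := fun z hz => hlen z (List.mem_cons_of_mem _ hz)
    by_cases hy : usedAt used y.2
    · rw [List.filter_cons_of_neg (by simp [hy])] at hf
      have hxP : x ∈ P := List.mem_of_mem_filter (hf ▸ List.mem_cons_self ..)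
      have hyne : y.2.toNat ≠ x.2.toNat := by
        intro h
        have h0y : 0 ≤ y.2 := hpos y (List.mem_cons_self ..)
        have h0x : 0 ≤ x.2 := hposP x hxP
        have hEq : y.2 = x.2 := by omega
        exact hnd2.1 (hEq ▸ List.mem_map_of_mem hxP)
      rw [List.filter_cons_of_neg (by simp [usedAt_set_ne hyne, hy])]
      exact ih hnd2.2 hposP hlenP hf
    · rw [List.filter_cons_of_pos (by simp [hy])] at hf
      injection hf with h1 h2
      subst h1
      rw [List.filter_cons_of_neg (by simp [usedAt_set_same (hlen y (List.mem_cons_self ..))])]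
      rw [← h2]
      apply List.filter_congr
      intro z hz
      have hzne : z.2.toNat ≠ y.2.toNat := by
        have h0z := hposP z hz
        have h0y := hpos y (List.mem_cons_self ..)
        have : z.2 ≠ y.2 := fun h => hnd2.1 (h ▸ List.mem_map_of_mem hz)
        omega
      simp [usedAt_set_ne hzne]

def stIter {α : Type} (f : α → α) : Nat → α → α
  | 0, st => st
  | g + 1, st => stIter f g (f st)

theorem foldl_ignore {α β : Type} (f : β → β) (l : List α) (st : β) :
    l.foldl (fun st _ => f st) st = stIter f l.length st := by
  induction l generalizing st with
  | nil => rfl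
  | cons x l ih => rw [List.foldl_cons, List.length_cons]; exact ih (f st)

theorem foldl_id {α β : Type} (l : List α) (st : β) :
    l.foldl (fun st _ => st) st = st := by
  induction l <;> simp_all

theorem usedAt_foldl_set (l : List (Int × Int)) (u0 : List Bool) (i : Int)
    (hlen : ∀ y ∈ l, y.2.toNat < u0.length) :
    usedAt (l.foldl (fun u y => u.set y.2.toNat true) u0) i
      = (usedAt u0 i || l.any (fun y => y.2.toNat == i.toNat)) := by
  induction l generalizing u0 with
  | nil => simp
  | cons y l ih =>
    rw [List.foldl_cons]
    have hlen' : ∀ z ∈ l, z.2.toNat < (u0.set y.2.toNat true).length := by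
      intro z hz; rw [List.length_set]; exact hlen z (List.mem_cons_of_mem _ hz)
    rw [ih _ hlen']
    by_cases hyi : i.toNat = y.2.toNat
    · have : usedAt (u0.set y.2.toNat true) i = true := by
        have : usedAt (u0.set y.2.toNat true) i = (u0.set y.2.toNat true).getD i.toNat false := rfl
        rw [this, hyi]
        have := usedAt_set_same (u := u0) (j := y.2) (hlen y (List.mem_cons_self ..))
        simpa [usedAt] using this
      simp [this, hyi]
    · rw [usedAt_set_ne hyi]
      have hyi2 : (y.2.toNat == i.toNat) = false := by
        simp; omega
      simp [hyi2]

-- the gap lemma: g consecutive slots over the SAME pool pop exactly min g |h| best unused tasks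
theorem gap_spec (P : List (Int × Int)) (hnd : (P.map (·.2)).Nodup)
    (hpos : ∀ y ∈ P, 0 ≤ y.2) (g : Nat) :
    ∀ (used : List Bool) (tot : Int) (idxs : List Int),
    (∀ y ∈ P, y.2.toNat < used.length) →
    ∀ h, h = P.filter (fun y => !(usedAt used y.2)) →
    stIter (pvPopUntil P) g (used, tot, idxs) =
      ((h.take (min g h.length)).foldl (fun u y => u.set y.2.toNat true) used,
       tot - ((h.take (min g h.length)).map (·.1)).sum,
       idxs ++ (h.take (min g h.length)).map (·.2))
    ∧ P.filter (fun y =>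
        !(usedAt ((h.take (min g h.length)).foldl (fun u y => u.set y.2.toNat true) used) y.2))
      = h.drop (min g h.length) := by
  induction g with
  | zero =>
    intro used tot idxs hlen h hh
    simp [stIter, hh]
  | succ g ih =>
    intro used tot idxs hlen h hh
    have hstep : stIter (pvPopUntil P) (g+1) (used, tot, idxs)
        = stIter (pvPopUntil P) g (pvPopUntil P (used, tot, idxs)) := rfl
    cases hfc : P.filter (fun y => !(usedAt used y.2)) with
    | nil =>
      have h0 : h = [] := by rw [hh, hfc]
      subst h0
      have hid : pvPopUntil P (used, tot, idxs) = (used, tot, idxs) := by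
        rw [popUntil_eq, hfc]
      rw [hstep, hid]
      have := ih used tot idxs hlen [] (hfc.symm)
      simpa using this
    | cons x tl =>
      have h0 : h = x :: tl := by rw [hh, hfc]
      subst h0
      have hid : pvPopUntil P (used, tot, idxs)
          = (used.set x.2.toNat true, tot - x.1, idxs ++ [x.2]) := by
        rw [popUntil_eq, hfc]
      have htl : P.filter (fun y => !(usedAt (used.set x.2.toNat true) y.2)) = tl :=
        filter_after P used x tl hnd hpos hlen hfc
      have hlen' : ∀ y ∈ P, y.2.toNat < (used.set x.2.toNat true).length := by
        intro y hy; rw [List.length_set]; exact hlen y hy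
      obtain ⟨e1, e2⟩ := ih (used.set x.2.toNat true) (tot - x.1) (idxs ++ [x.2]) hlen' tl htl.symm
      rw [hstep, hid]
      have hmin : min (g+1) (x :: tl).length = (min g tl.length) + 1 := by
        rw [List.length_cons]; omega
      rw [hmin]
      rw [List.take_succ_cons, List.drop_succ_cons]
      constructor
      · rw [e1]
        refine Prod.ext ?_ (Prod.ext ?_ ?_)
        · simp
        · simp; ring
        · simp
      · exact e2

theorem popN_spec (m : Nat) :
    ∀ (h : List (Int × Int)) (tot : Int) (idxs : List Int), m ≤ h.length →
    pvPopN m h tot idxs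
      = (h.drop m, tot - ((h.take m).map (·.1)).sum, idxs ++ (h.take m).map (·.2)) := by
  induction m with
  | zero => intro h tot idxs _; simp [pvPopN]
  | succ m ih =>
    intro h tot idxs hm
    cases h with
    | nil => simp at hm
    | cons x h =>
      rw [show pvPopN (m+1) (x :: h) tot idxs = pvPopN m h (tot - x.1) (idxs ++ [x.2]) from rfl]
      rw [ih h (tot - x.1) (idxs ++ [x.2]) (by simpa using hm)]
      rw [List.take_succ_cons, List.drop_succ_cons]
      refine Prod.ext ?_ (Prod.ext ?_ ?_)
      · simp
      · simp; ring
      · simp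

-- bound of a sorted tail: everything dropped past the equal-head block is strictly larger
theorem span_bound (d : Int) :
    ∀ (ts : List (Int × Int × Int)), ts.Pairwise (fun a b => a.1 ≤ b.1) →
    (∀ u ∈ ts, d ≤ u.1) →
    ∀ u ∈ ts.dropWhile (fun u => u.1 == d), d < u.1 := by
  intro ts
  induction ts with
  | nil => intro _ _ u hu; simp [List.dropWhile] at hu
  | cons v vs ih =>
    intro hpw hge u hu
    rw [List.pairwise_cons] at hpw
    by_cases hv : v.1 = d
    · rw [List.dropWhile_cons_of_pos (by simp [hv])] at hu
      exact ih hpw.2 (fun z hz => hge z (List.mem_cons_of_mem _ hz)) u hu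
    · rw [List.dropWhile_cons_of_neg (by simp [hv])] at hu
      rcases List.mem_cons.1 hu with rfl | hu2
      · have := hge u (List.mem_cons_self ..); omega
      · have h1 := hpw.1 u hu2
        have h2 := hge v (List.mem_cons_self ..)
        omega

-- ---- the main induction: B's batched groups equal A's slot loop ----


theorem main_step (arr : List (Int × Int × Int)) (L : Int) (N : Nat)
    (hnd : (arr.map (fun t => t.2.2)).Nodup)
    (hidx : ∀ t ∈ arr, 0 ≤ t.2.2 ∧ t.2.2.toNat < N)
    (hL : ∀ t ∈ arr, t.1 ≤ L)
    (fuel : Nat)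
    (ih : ∀ (S : List (Int × Int × Int)), S.length ≤ fuel →
      ∀ (c : Int) (h : List (Int × Int)) (used : List Bool) (tot : Int) (idxs : List Int),
      S.Pairwise (fun a b => a.1 ≤ b.1) →
      S.Perm (arr.filter (fun u => decide (c ≤ u.1))) →
      (∀ t₀ ts₀, S = t₀ :: ts₀ → c = t₀.1) →
      (S = [] → L < c) →
      (S ≠ [] → L ∈ S.map (fun u => u.1)) →
      used.length = N →
      (∀ u ∈ S, usedAt used u.2.2 = false) →
      h = (pvPool arr c).filter (fun y => !(usedAt used y.2)) →
      pvBgo S h tot idxs =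
        (((PySem.List.pyRange c (L+1) 1).foldl
            (fun st s => pvPopUntil (pvPool arr (s+1)) st) (used, tot, idxs)).2.1,
         ((PySem.List.pyRange c (L+1) 1).foldl
            (fun st s => pvPopUntil (pvPool arr (s+1)) st) (used, tot, idxs)).2.2))
    (t : Int × Int × Int) (ts : List (Int × Int × Int))
    (grp rest : List (Int × Int × Int)) (c' : Int)
    (hgrp : grp = t :: ts.takeWhile (fun u => u.1 == t.1))
    (hrest : rest = ts.dropWhile (fun u => u.1 == t.1))
    (hc'nil : rest = [] → c' = L + 1)
    (hc'head : ∀ r rs, rest = r :: rs → c' = r.1)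
    (h : List (Int × Int)) (used : List Bool) (tot : Int) (idxs : List Int)
    (hle : (t :: ts).length ≤ fuel + 1)
    (hpw : (t :: ts).Pairwise (fun a b => a.1 ≤ b.1))
    (hperm : (t :: ts).Perm (arr.filter (fun u => decide (t.1 ≤ u.1))))
    (hmax : L ∈ (t :: ts).map (fun u => u.1))
    (hulen : used.length = N)
    (hfresh : ∀ u ∈ t :: ts, usedAt used u.2.2 = false)
    (hh : h = (pvPool arr t.1).filter (fun y => !(usedAt used y.2))) :
    pvBgo (t :: ts) h tot idxs =
      (((PySem.List.pyRange t.1 (L+1) 1).foldl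
          (fun st s => pvPopUntil (pvPool arr (s+1)) st) (used, tot, idxs)).2.1,
       ((PySem.List.pyRange t.1 (L+1) 1).foldl
          (fun st s => pvPopUntil (pvPool arr (s+1)) st) (used, tot, idxs)).2.2) := by
  rw [List.pairwise_cons] at hpw
  obtain ⟨hpw1, hpw2⟩ := hpw
  have hsplit : grp ++ rest = t :: ts := by rw [hgrp, hrest]; simp
  have harrS : ∀ u ∈ t :: ts, u ∈ arr := fun u hu => List.mem_of_mem_filter (hperm.subset hu)
  have hgrp_sub : ∀ u ∈ grp, u ∈ t :: ts := by
    intro u hu; rw [← hsplit]; exact List.mem_append_left _ hu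
  have hrest_sub : ∀ u ∈ rest, u ∈ t :: ts := by
    intro u hu; rw [← hsplit]; exact List.mem_append_right _ hu
  have hgrp_eq : ∀ u ∈ grp, u.1 = t.1 := by
    intro u hu; rw [hgrp] at hu
    rcases List.mem_cons.1 hu with rfl | hu2
    · rfl
    · simpa using List.mem_takeWhile_imp hu2
  have hrest_gt : ∀ u ∈ rest, t.1 < u.1 := by
    rw [hrest]; exact span_bound t.1 ts hpw2 hpw1
  have htL : t.1 ≤ L := hL t (harrS t (List.mem_cons_self ..))
  have hrest_ge : ∀ u ∈ rest, c' ≤ u.1 := by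
    cases hr : rest with
    | nil => intro u hu; simp at hu
    | cons r rs =>
      have hc'r := hc'head r rs hr
      intro u hu
      rcases List.mem_cons.1 hu with rfl | hu2
      · omega
      · have hsub : rest.Sublist ts := hrest ▸ List.dropWhile_sublist _
        have hpwr := hpw2.sublist hsub
        rw [hr, List.pairwise_cons] at hpwr
        have := hpwr.1 u hu2
        omega
  have hcc' : t.1 < c' := by
    cases hr : rest with
    | nil => have := hc'nil hr; omega
    | cons r rs =>
      have h1 := hrest_gt r (by rw [hr]; exact List.mem_cons_self ..)
      have h2 := hc'head r rs hr
      omega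
  have hc'L : c' ≤ L + 1 := by
    cases hr : rest with
    | nil => have := hc'nil hr; omega
    | cons r rs =>
      have h2 := hc'head r rs hr
      have := hL r (harrS r (hrest_sub r (by rw [hr]; exact List.mem_cons_self ..)))
      omega
  have hlast : rest = [] → t.1 = L := by
    intro hr
    have hgrpS : grp = t :: ts := by rw [← hsplit, hr, List.append_nil]
    obtain ⟨u, hu, hueq⟩ := List.mem_map.1 hmax
    rw [← hueq]
    exact (hgrp_eq u (by rw [hgrpS]; exact hu)).symm
  obtain ⟨h', hh'def⟩ : ∃ x, x = grp.foldl (fun hh u => pvHpush (-u.2.1, u.2.2) hh) h := ⟨_, rfl⟩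
  have hstep : pvBgo (t :: ts) h tot idxs =
      pvBgo (ts.dropWhile (fun u => u.1 == t.1))
        (pvPopN (min (c' - t.1) (h'.length : Int)).toNat h' tot idxs).1
        (pvPopN (min (c' - t.1) (h'.length : Int)).toNat h' tot idxs).2.1
        (pvPopN (min (c' - t.1) (h'.length : Int)).toNat h' tot idxs).2.2 := by
    rw [pvBgo, ← hgrp, ← hh'def]
    cases hE : (ts.dropWhile (fun u => u.1 == t.1)) with
    | nil =>
      have h1 := hc'nil (hrest.trans hE)
      have h2 := hlast (hrest.trans hE)
      have h3 : c' - t.1 = 1 := by omega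
      rw [h3]
    | cons r rs =>
      have h1 := hc'head r rs (hrest.trans hE)
      have h3 : r.1 - t.1 = c' - t.1 := by omega
      rw [← h3]
  rw [← hrest] at hstep
  -- the pushed heap is the unused-filter of the pool at c'
  have hfold_eq : h' = kpushAll (grp.map keyOf) h := by
    rw [hh'def, kpushAll, List.foldl_map]
    rfl
  have hsorted_h : h.Pairwise rK := hh ▸ (pool_sorted arr t.1).filter _
  have hsorted_h' : h'.Pairwise rK := by
    rw [hfold_eq]; exact kpushAll_sorted _ _ hsorted_h
  have hfilters : (arr.filter (fun u => decide (u.1 < c'))).Perm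
      ((arr.filter (fun u => decide (u.1 < t.1))) ++ grp) := by
    have A1 := List.filter_append_perm (fun u => decide (t.1 ≤ u.1)) arr
    have A2 := (A1.symm.filter (fun u => decide (u.1 < c')))
    rw [List.filter_append] at A2
    have A3 : ((arr.filter (fun u => decide (t.1 ≤ u.1))).filter
        (fun u => decide (u.1 < c'))).Perm grp := by
      have B1 := (hperm.symm.filter (fun u => decide (u.1 < c')))
      have B2 : (t :: ts).filter (fun u => decide (u.1 < c')) = grp := by
        rw [← hsplit, List.filter_append]
        rw [List.filter_eq_self.2 (fun u hu => by
          have := hgrp_eq u hu; simp only [decide_eq_true_eq]; omega)]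
        rw [List.filter_eq_nil_iff.2 (fun u hu => by
          have := hrest_ge u hu; simp only [decide_eq_true_eq]; omega)]
        rw [List.append_nil]
      rw [B2] at B1
      exact B1
    have A4 : (arr.filter (fun u => !decide (t.1 ≤ u.1))).filter
        (fun u => decide (u.1 < c')) = arr.filter (fun u => decide (u.1 < t.1)) := by
      rw [List.filter_filter]
      apply List.filter_congr
      intro u _
      by_cases h1 : u.1 < t.1
      · have h2 : u.1 < c' := by omega
        have h3 : ¬ (t.1 ≤ u.1) := by omega
        simp [h1, h2, h3]
      · by_cases h4 : t.1 ≤ u.1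
        · simp [h1, h4]
        · exact (h1 (by omega)).elim
    have A5 : (((arr.filter (fun u => decide (t.1 ≤ u.1))).filter (fun u => decide (u.1 < c')))
        ++ ((arr.filter (fun u => !decide (t.1 ≤ u.1))).filter (fun u => decide (u.1 < c')))).Perm
        (grp ++ (arr.filter (fun u => decide (u.1 < t.1)))) :=
      A3.append (A4 ▸ List.Perm.refl _)
    exact (A2.trans A5).trans List.perm_append_comm
  have hP2' : (pvPool arr c').Perm
      (((arr.filter (fun u => decide (u.1 < t.1))).map keyOf) ++ grp.map keyOf) := by
    have := (pool_perm arr c').trans (hfilters.map keyOf)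
    rwa [List.map_append] at this
  have hF3 : (grp.map keyOf).filter (fun y => !(usedAt used y.2)) = grp.map keyOf := by
    apply List.filter_eq_self.2
    intro y hy
    obtain ⟨u, hu, rfl⟩ := List.mem_map.1 hy
    have := hfresh u (hgrp_sub u hu)
    simp [keyOf, this]
  have hF4 : (((arr.filter (fun u => decide (u.1 < t.1))).map keyOf).filter
      (fun y => !(usedAt used y.2))).Perm h := by
    have := (pool_perm arr t.1).symm.filter (fun y => !(usedAt used y.2))
    rw [← hh] at this
    exact this
  have hpoolfilter : (pvPool arr c').filter (fun y => !(usedAt used y.2)) = h' := by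
    apply sorted_unique ((pool_sorted arr c').filter _) hsorted_h'
    have E1 := hP2'.filter (fun y => !(usedAt used y.2))
    rw [List.filter_append, hF3] at E1
    have E2 := (hF4.append (List.Perm.refl (grp.map keyOf)))
    have E3 : (h ++ grp.map keyOf).Perm h' := by
      rw [hfold_eq]; exact (kpushAll_perm (grp.map keyOf) h).symm
    exact (E1.trans E2).trans E3
  -- facts about the pool at c'
  have hpoolmem : ∀ y ∈ pvPool arr c', ∃ u ∈ arr, keyOf u = y ∧ u.1 < c' := by
    intro y hy
    have := (pool_perm arr c').mem_iff.1 hy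
    obtain ⟨u, hu, rfl⟩ := List.mem_map.1 this
    have := List.mem_filter.1 hu
    exact ⟨u, this.1, rfl, by simpa using this.2⟩
  have hposP : ∀ y ∈ pvPool arr c', 0 ≤ y.2 := by
    intro y hy
    obtain ⟨u, hu, rfl, _⟩ := hpoolmem y hy
    exact (hidx u hu).1
  have hlenP : ∀ y ∈ pvPool arr c', y.2.toNat < used.length := by
    intro y hy
    obtain ⟨u, hu, rfl, _⟩ := hpoolmem y hy
    rw [hulen]
    exact (hidx u hu).2
  have hndP : ((pvPool arr c').map (·.2)).Nodup := by
    have q1 := (pool_perm arr c').map (·.2)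
    rw [List.map_map] at q1
    have q2 : ((arr.filter (fun u => decide (u.1 < c'))).map (fun u => u.2.2)).Sublist
        (arr.map (fun u => u.2.2)) := List.Sublist.map _ List.filter_sublist
    have q3 := hnd.sublist q2
    exact q1.nodup_iff.2 q3
  -- the A-side chunk over [t.1, c') is an iteration over the constant pool at c'
  have hcg : ∀ acc, ∀ s ∈ PySem.List.pyRange t.1 c' 1,
      pvPopUntil (pvPool arr (s+1)) acc = pvPopUntil (pvPool arr c') acc := by
    intro acc s hs
    have hsmem := PySem.List.mem_pyRange_one.1 hs
    rw [pool_congr arr (s+1) c' ?_]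
    intro u hu
    constructor
    · intro h1; omega
    · intro h1
      by_cases hdu : t.1 ≤ u.1
      · have huS : u ∈ t :: ts := hperm.mem_iff.2 (List.mem_filter.2 ⟨hu, by simpa⟩)
        have : u ∈ grp ∨ u ∈ rest := by
          rw [← hsplit] at huS; exact List.mem_append.1 huS
        rcases this with hg | hr2
        · have := hgrp_eq u hg; omega
        · have := hrest_ge u hr2; omega
      · omega
  have hchunk1 : (PySem.List.pyRange t.1 c' 1).foldl
      (fun st s => pvPopUntil (pvPool arr (s+1)) st) (used, tot, idxs)
      = stIter (pvPopUntil (pvPool arr c')) ((c' - t.1).toNat) (used, tot, idxs) := by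
    rw [PySem.List.foldl_congr_mem _ _ _ _ hcg, foldl_ignore, PySem.List.length_pyRange_one]
  obtain ⟨e1, e2⟩ := gap_spec (pvPool arr c') hndP hposP ((c' - t.1).toNat)
    used tot idxs hlenP h' hpoolfilter.symm
  have hkm : (min (c' - t.1) ((h'.length : Nat) : Int)).toNat
      = min ((c' - t.1).toNat) h'.length := by omega
  have hmle : min ((c' - t.1).toNat) h'.length ≤ h'.length := Nat.min_le_right _ _
  have hpop := popN_spec (min ((c' - t.1).toNat) h'.length) h' tot idxs hmle
  -- facts for the recursive call
  have hlen2 : rest.length ≤ fuel := by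
    have h2 : rest.length ≤ ts.length := by
      rw [hrest]; exact List.length_dropWhile_le _ _
    have h3 : ts.length + 1 ≤ fuel + 1 := by simpa using hle
    omega
  have hpwrest : rest.Pairwise (fun a b => a.1 ≤ b.1) :=
    hpw2.sublist (hrest ▸ List.dropWhile_sublist _)
  have hpermrest : rest.Perm (arr.filter (fun u => decide (c' ≤ u.1))) := by
    have C1 : arr.filter (fun u => decide (c' ≤ u.1))
        = (arr.filter (fun u => decide (t.1 ≤ u.1))).filter (fun u => decide (c' ≤ u.1)) := by
      rw [List.filter_filter]
      apply List.filter_congr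
      intro u _
      by_cases h1 : c' ≤ u.1
      · simp [h1, show t.1 ≤ u.1 by omega]
      · simp [h1]
    have C2 : (t :: ts).filter (fun u => decide (c' ≤ u.1)) = rest := by
      rw [← hsplit, List.filter_append]
      rw [List.filter_eq_nil_iff.2 (fun u hu => by
        have := hgrp_eq u hu; simp only [decide_eq_true_eq]; omega)]
      rw [List.filter_eq_self.2 (fun u hu => by
        have := hrest_ge u hu; simp only [decide_eq_true_eq]; omega)]
      simp
    have := hperm.filter (fun u => decide (c' ≤ u.1))
    rw [C2] at this
    rw [C1]
    exact this
  have hnilrest : rest = [] → L < c' := fun hr => by have := hc'nil hr; omega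
  have hmaxrest : rest ≠ [] → L ∈ rest.map (fun u => u.1) := by
    intro hne
    obtain ⟨u, hu, hueq⟩ := List.mem_map.1 hmax
    have : u ∈ grp ∨ u ∈ rest := by
      rw [← hsplit] at hu; exact List.mem_append.1 hu
    rcases this with hg | hr2
    · exfalso
      have hud := hgrp_eq u hg
      cases hr : rest with
      | nil => exact hne hr
      | cons r rs =>
        have hgt := hrest_gt r (by rw [hr]; exact List.mem_cons_self ..)
        have hrL := hL r (harrS r (hrest_sub r (by rw [hr]; exact List.mem_cons_self ..)))
        omega
    · exact List.mem_map.2 ⟨u, hr2, hueq⟩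
  have hulen2 : ((h'.take (min ((c' - t.1).toNat) h'.length)).foldl
      (fun u y => u.set y.2.toNat true) used).length = N := by
    rw [length_foldl_set]; exact hulen
  have hfresh2 : ∀ u ∈ rest, usedAt ((h'.take (min ((c' - t.1).toNat) h'.length)).foldl
      (fun u y => u.set y.2.toNat true) used) u.2.2 = false := by
    intro u hu
    have humem : u ∈ t :: ts := hrest_sub u hu
    have h0 := hfresh u humem
    have hlenTake : ∀ y ∈ h'.take (min ((c' - t.1).toNat) h'.length),
        y.2.toNat < used.length := by
      intro y hy
      have hyh' : y ∈ h' := List.mem_of_mem_take hy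
      rw [← hpoolfilter] at hyh'
      exact hlenP y (List.mem_of_mem_filter hyh')
    rw [usedAt_foldl_set _ _ _ hlenTake, h0]
    simp only [Bool.false_or]
    apply List.any_eq_false.2
    intro y hy
    have hyh' : y ∈ h' := List.mem_of_mem_take hy
    have hypool : y ∈ pvPool arr c' := by
      rw [← hpoolfilter] at hyh'
      exact List.mem_of_mem_filter hyh'
    obtain ⟨w, hw, hkw, hwlt⟩ := hpoolmem y hypool
    simp only [Bool.not_eq_true, beq_eq_false_iff_ne, ne_eq]
    intro hEq
    have h0y : 0 ≤ y.2 := hposP y hypool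
    have h0u : 0 ≤ u.2.2 := (hidx u (harrS u humem)).1
    have hyu : y.2 = u.2.2 := by omega
    have hw22 : w.2.2 = u.2.2 := by
      have : (keyOf w).2 = y.2 := by rw [hkw]
      simpa [keyOf, hyu] using this
    have hwu : w = u := List.inj_on_of_nodup_map hnd hw (harrS u humem) hw22
    have hge := hrest_ge u hu
    rw [hwu] at hwlt
    omega
  -- assemble
  rw [hstep, hkm, hpop]
  rw [PySem.List.pyRange_one_append t.1 c' (L+1) (le_of_lt hcc') hc'L, List.foldl_append,
    hchunk1, e1]
  exact ih rest hlen2 c' _ _ _ _ hpwrest hpermrest hc'head hnilrest hmaxrest hulen2 hfresh2 e2.symm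

theorem main_lemma (arr : List (Int × Int × Int)) (L : Int) (N : Nat)
    (hnd : (arr.map (fun t => t.2.2)).Nodup)
    (hidx : ∀ t ∈ arr, 0 ≤ t.2.2 ∧ t.2.2.toNat < N)
    (hL : ∀ t ∈ arr, t.1 ≤ L) :
    ∀ (fuel : Nat) (S : List (Int × Int × Int)), S.length ≤ fuel →
    ∀ (c : Int) (h : List (Int × Int)) (used : List Bool) (tot : Int) (idxs : List Int),
    S.Pairwise (fun a b => a.1 ≤ b.1) →
    S.Perm (arr.filter (fun u => decide (c ≤ u.1))) →
    (∀ t₀ ts₀, S = t₀ :: ts₀ → c = t₀.1) →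
    (S = [] → L < c) →
    (S ≠ [] → L ∈ S.map (fun u => u.1)) →
    used.length = N →
    (∀ u ∈ S, usedAt used u.2.2 = false) →
    h = (pvPool arr c).filter (fun y => !(usedAt used y.2)) →
    pvBgo S h tot idxs =
      (((PySem.List.pyRange c (L+1) 1).foldl
          (fun st s => pvPopUntil (pvPool arr (s+1)) st) (used, tot, idxs)).2.1,
       ((PySem.List.pyRange c (L+1) 1).foldl
          (fun st s => pvPopUntil (pvPool arr (s+1)) st) (used, tot, idxs)).2.2) := by
  intro fuel
  induction fuel with
  | zero =>
    intro S hle c h used tot idxs _ _ _ hnil _ _ _ _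
    have hS : S = [] := List.length_eq_zero_iff.1 (Nat.le_zero.1 hle)
    subst hS
    rw [PySem.List.pyRange_one_eq_nil (by have := hnil rfl; omega)]
    simp [pvBgo]
  | succ fuel ih =>
    intro S hle c h used tot idxs hpw hperm hhead hnil hmax hulen hfresh hh
    cases S with
    | nil =>
      rw [PySem.List.pyRange_one_eq_nil (by have := hnil rfl; omega)]
      simp [pvBgo]
    | cons t ts =>
      have hc : c = t.1 := hhead t ts rfl
      subst hc
      obtain ⟨c', hc'nil, hc'head⟩ : ∃ c',
          (ts.dropWhile (fun u => u.1 == t.1) = [] → c' = L + 1)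
          ∧ (∀ r rs, ts.dropWhile (fun u => u.1 == t.1) = r :: rs → c' = r.1) := by
        cases hr : ts.dropWhile (fun u => u.1 == t.1) with
        | nil => exact ⟨L + 1, fun _ => rfl, fun r rs hh2 => by simp at hh2⟩
        | cons r rs =>
          refine ⟨r.1, fun hh2 => by simp at hh2, fun r' rs' hh2 => ?_⟩
          injection hh2 with h1 _
          rw [h1]
      exact main_step arr L N hnd hidx hL fuel ih t ts _ _ c' rfl rfl hc'nil hc'head
        h used tot idxs hle hpw hperm (hmax (by simp)) hulen hfresh hh

theorem usedAt_replicate (n : Nat) (i : Int) :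
    usedAt (List.replicate n false) i = false := by
  by_cases hi : i.toNat < n
  · simp [usedAt, List.getD_eq_getElem?_getD, List.getElem?_replicate, hi]
  · simp [usedAt, List.getD_eq_getElem?_getD, List.getElem?_replicate, hi]

theorem tasks_with_deadlines_spec : Claim_equal_tasks_with_deadlines := by
  unfold Claim_equal_tasks_with_deadlines Spec_tasks_with_deadlines
  intro T _ hpre
  obtain ⟨hne, hpos⟩ := hpre
  have hTm : T.map (·.1) ≠ [] := by
    intro hcon; exact hne (List.map_eq_nil_iff.1 hcon)
  obtain ⟨L, hmL⟩ : ∃ m, PySem.List.max? (T.map (·.1)) (fun x => x) = some m := by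
    cases hmx : PySem.List.max? (T.map (·.1)) (fun x => x) with
    | none => exact absurd ((PySem.List.max?_eq_none_iff _ _).1 hmx) hTm
    | some m => exact ⟨m, rfl⟩
  simp only [tasks_with_deadlines, tasks_with_deadlines_alt, hmL, Option.getD_some]
  set arr := (PySem.List.enumerate T).map (fun p => (p.2.1, p.2.2, p.1)) with harrdef
  -- structure of arr
  have harrmem : ∀ u ∈ arr, u.1 ∈ T.map (·.1) ∧ 0 ≤ u.2.2 ∧ u.2.2.toNat < T.length := by
    intro u hu
    rw [harrdef] at hu
    obtain ⟨p, hp, rfl⟩ := List.mem_map.1 hu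
    obtain ⟨k, hk, rfl⟩ := (PySem.List.mem_enumerate_iff _ _ _).1 hp
    refine ⟨List.mem_map.2 ⟨T[k], List.getElem_mem hk, rfl⟩, by dsimp only; omega, by dsimp only; omega⟩
  have hLmax : ∀ u ∈ arr, u.1 ≤ L := by
    intro u hu
    exact PySem.List.max?_isMax hmL u.1 (harrmem u hu).1
  have hposArr : ∀ u ∈ arr, 0 ≤ u.1 := by
    intro u hu
    obtain ⟨v, hv, hveq⟩ := List.mem_map.1 (harrmem u hu).1
    rw [← hveq]; exact hpos v hv
  have hidx : ∀ u ∈ arr, 0 ≤ u.2.2 ∧ u.2.2.toNat < T.length :=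
    fun u hu => (harrmem u hu).2
  have hndfst : arr.map (fun u => u.2.2) = (PySem.List.enumerate T).map (fun p => p.1) := by
    rw [harrdef, List.map_map]
    rfl
  have hnd : (arr.map (fun u => u.2.2)).Nodup := by
    rw [hndfst, PySem.List.map_fst_enumerate]
    exact PySem.List.nodup_pyRange_one _ _
  have harr1 : arr.map (fun u => u.1) = T.map (·.1) := by
    conv_rhs => rw [← PySem.List.map_snd_enumerate T 0]
    rw [harrdef, List.map_map, List.map_map]
    rfl
  have hLmem : L ∈ T.map (·.1) := PySem.List.max?_mem hmL
  -- the sorted task list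
  have hSperm := PySem.List.sorted_perm arr (fun u => u.1) false
  have hSpw := PySem.List.sorted_pairwise arr (fun u => u.1)
  cases hS : PySem.List.sorted arr (fun u => u.1) false with
  | nil =>
    exfalso
    have harrnil : arr = [] := (PySem.List.sorted_eq_nil_iff _ _ _).1 hS
    have : T.length = 0 := by
      have h1 : arr.length = T.length := by
        rw [harrdef, List.length_map, PySem.List.length_enumerate]
      rw [harrnil] at h1
      simpa using h1.symm
    exact hne (List.length_eq_zero_iff.1 this)
  | cons t ts =>
    have hmin : ∀ u ∈ arr, t.1 ≤ u.1 := PySem.List.key_head_sorted_le arr (fun u => u.1) hS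
    have htarr : t ∈ arr := hSperm.subset (by rw [hS]; exact List.mem_cons_self ..)
    have h0d0 : 0 ≤ t.1 := hposArr t htarr
    have hd0L : t.1 ≤ L := hLmax t htarr
    -- replace bucket lookups by pools
    have hstepcong : ∀ acc, ∀ s ∈ PySem.List.pyRange 0 (L+1) 1,
        pvPopUntil ((pvBuckets arr L).getD s.toNat []) acc
          = pvPopUntil (pvPool arr (s+1)) acc := by
      intro acc s hs
      have hsm := PySem.List.mem_pyRange_one.1 hs
      have hcast : ((s.toNat : Int)) = s := by omega
      have hgetd : (pvBuckets arr L).getD s.toNat [] = pvPool arr (s + 1) := by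
        rw [List.getD_eq_getElem?_getD]
        rw [buckets_get arr L hposArr s.toNat (by omega)]
        simp only [Option.getD_some]
        unfold pvPool
        congr 1
        congr 1
        apply List.filter_congr
        intro u _
        rw [hcast]
        simp only [decide_eq_decide]
        omega
      rw [hgetd]
    rw [PySem.List.foldl_congr_mem _ _ _ _ hstepcong]
    rw [PySem.List.pyRange_one_append 0 t.1 (L+1) h0d0 (by omega), List.foldl_append]
    -- the slots before the first deadline see empty pools
    have hchunk0 : ∀ acc, ∀ s ∈ PySem.List.pyRange 0 t.1 1,
        pvPopUntil (pvPool arr (s+1)) acc = acc := by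
      intro acc s hs
      have hsm := PySem.List.mem_pyRange_one.1 hs
      have hpool0 : pvPool arr (s+1) = [] := by
        unfold pvPool
        rw [List.filter_eq_nil_iff.2 (fun u hu => by
          have := hmin u hu
          simp only [decide_eq_true_eq]
          omega)]
        rfl
      rw [hpool0]
      rcases acc with ⟨u1, u2, u3⟩
      rfl
    rw [PySem.List.foldl_congr_mem _ _ (fun st _ => st) _ hchunk0, foldl_id]
    -- initial state facts
    have hfresh0 : ∀ u ∈ (t :: ts), usedAt (List.replicate T.length false) u.2.2 = false :=
      fun u _ => usedAt_replicate _ _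
    have hpoolt : pvPool arr t.1 = [] := by
      unfold pvPool
      rw [List.filter_eq_nil_iff.2 (fun u hu => by
        have := hmin u hu
        simp only [decide_eq_true_eq]
        omega)]
      rfl
    have hh0 : ([] : List (Int × Int))
        = (pvPool arr t.1).filter (fun y => !(usedAt (List.replicate T.length false) y.2)) := by
      rw [hpoolt]
      rfl
    have hpermS : (t :: ts).Perm (arr.filter (fun u => decide (t.1 ≤ u.1))) := by
      have hfe : arr.filter (fun u => decide (t.1 ≤ u.1)) = arr :=
        List.filter_eq_self.2 (fun u hu => by
          simp only [decide_eq_true_eq]; exact hmin u hu)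
      rw [hfe]
      exact hS ▸ hSperm
    have hmaxS : (t :: ts) ≠ [] → L ∈ (t :: ts).map (fun u => u.1) := by
      intro _
      have h1 : L ∈ arr.map (fun u => u.1) := by rw [harr1]; exact hLmem
      exact ((hS ▸ hSperm).map (fun u : Int × Int × Int => u.1)).mem_iff.2 h1
    have hmain := main_lemma arr L T.length hnd hidx hLmax (t :: ts).length (t :: ts)
      (le_refl _) t.1 [] (List.replicate T.length false) 0 []
      (hS ▸ hSpw) hpermS
      (fun t₀ ts₀ heq => by injection heq with h1 _; rw [h1])
      (fun hcon => by simp at hcon)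
      hmaxS List.length_replicate hfresh0 hh0
    exact hmain.symm
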